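-- pv_equiv track=rewrite | github.com/CleverHolmes/Spacy | spacy/lang/ko/__init__.py | check_spaces
-- ===== SOURCE A (Python) =====
-- def check_spaces(text, tokens):
--     prev_end = -1
--     start = 0
--     for token in tokens:
--         idx = text.find(token, start)
--         if prev_end > 0:
--             yield prev_end != idx
--         prev_end = idx + len(token)
--         start = prev_end
--     if start > 0:
--         yield False
-- ===== SOURCE B (Python) =====
-- def check_spaces(text, tokens):
--     # pass 1: locate every token, recording (idx, end)
--     positions = []
--     start = 0
--     for token in tokens:
--         idx = text.find(token, start)
--         start = idx + len(token)
--         positions.append((idx, start))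
--     # pass 2: emit one gap flag per consecutive pair
--     for (_, prev_end), (idx, _) in zip(positions, positions[1:]):
--         if prev_end > 0:
--             yield prev_end != idx
--     if positions and positions[-1][1] > 0:
--         yield False
-- ===== Notes on version B (the rewrite author's own statement) =====
-- stated objective: alternative
-- what changed: B splits A's single interleaved loop into two differently-shaped passes: a first pass that records every token's (idx, end) position, and a second pass over zipped consecutive position pairs that emits the gap flags, with the trailing False decided from the last recorded end.
import Mathlib
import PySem

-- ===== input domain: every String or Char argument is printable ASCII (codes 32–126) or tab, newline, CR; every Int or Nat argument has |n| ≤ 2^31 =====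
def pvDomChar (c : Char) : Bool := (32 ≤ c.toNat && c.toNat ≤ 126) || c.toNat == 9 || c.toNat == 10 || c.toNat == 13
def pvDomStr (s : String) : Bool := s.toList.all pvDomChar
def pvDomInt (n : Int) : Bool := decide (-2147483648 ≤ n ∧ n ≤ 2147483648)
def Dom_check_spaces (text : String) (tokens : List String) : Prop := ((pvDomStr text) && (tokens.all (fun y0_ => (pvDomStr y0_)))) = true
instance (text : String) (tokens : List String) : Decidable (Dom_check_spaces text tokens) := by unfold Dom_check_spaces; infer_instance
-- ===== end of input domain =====

-- B re-decomposes A's single interleaved loop into two passes (positions, then gaps); same results, same cost.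

-- ===== PORT A =====
-- A's for-loop over tokens with state (prev_end, start), yields collected in order;
-- the trailing 'if start > 0: yield False' is the base case.
def csA_loop (text : String) (prev_end start : Int) : List String → List Bool
  | [] => if start > 0 then [false] else []
  | token :: ts =>
      let idx := PySem.Str.findFrom text token start
      (if prev_end > 0 then [decide (prev_end ≠ idx)] else []) ++
        csA_loop text (idx + (PySem.Str.len token : Int)) (idx + (PySem.Str.len token : Int)) ts

def check_spaces (text : String) (tokens : List String) : List Bool :=
  csA_loop text (-1) 0 tokens

-- ===== PORT B =====
-- pass 1 of B: build the positions list [(idx, end), …], advancing start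
def csB_positions (text : String) (start : Int) : List String → List (Int × Int)
  | [] => []
  | token :: ts =>
      let idx := PySem.Str.findFrom text token start
      (idx, idx + (PySem.Str.len token : Int)) :: csB_positions text (idx + (PySem.Str.len token : Int)) ts

def check_spaces_alt (text : String) (tokens : List String) : List Bool :=
  let positions := csB_positions text 0 tokens
  -- pass 2 of B: one flag per consecutive pair, then the trailing False
  let gaps := (positions.zip (positions.drop 1)).foldl
      (fun out pq => if pq.1.2 > 0 then out ++ [decide (pq.1.2 ≠ pq.2.1)] else out) []
  match positions.getLast? with
  | some p => if p.2 > 0 then gaps ++ [false] else gaps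
  | none => gaps

-- ===== PRECONDITION & SPEC =====
def Spec_check_spaces (text : String) (tokens : List String) (out : List Bool) : Prop := out = check_spaces_alt text tokens
instance (text : String) (tokens : List String) (out : List Bool) : Decidable (Spec_check_spaces text tokens out) := by unfold Spec_check_spaces; infer_instance

-- ===== CLAIM (what is proved, stated in full; the proofs are below) =====
def Claim_equal_check_spaces : Prop := ∀ (text : String) (tokens : List String), Dom_check_spaces text tokens → Spec_check_spaces text tokens (check_spaces text tokens)

-- ===== LEMMAS AND PROOFS =====

-- gap emission over a positions list, carrying the previous end (A's view of B's data)
def gapsFrom (prev_end : Int) : List (Int × Int) → List Bool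
  | [] => []
  | (idx, e) :: rest => (if prev_end > 0 then [decide (prev_end ≠ idx)] else []) ++ gapsFrom e rest

-- the value of 'start' after the loop: the last recorded end, or the initial start
def lastEnd (start : Int) : List (Int × Int) → Int
  | [] => start
  | (_, e) :: rest => lastEnd e rest

-- A's loop equals: gaps from the positions list, plus the trailing False from the final start
theorem csA_eq (text : String) (ts : List String) :
    ∀ prev_end start : Int, csA_loop text prev_end start ts =
      gapsFrom prev_end (csB_positions text start ts) ++
        (if lastEnd start (csB_positions text start ts) > 0 then [false] else []) := by
  induction ts with
  | nil => intro pe s; simp [csA_loop, csB_positions, gapsFrom, lastEnd]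
  | cons t ts ih =>
      intro pe s
      simp only [csA_loop, csB_positions, gapsFrom, lastEnd]
      rw [ih, List.append_assoc]
      rfl


theorem lastEnd_getLast? (ps : List (Int × Int)) :
    ∀ s : Int, lastEnd s ps = match ps.getLast? with | some p => p.2 | none => s := by
  induction ps with
  | nil => intro s; simp [lastEnd]
  | cons p ps ih =>
      intro s
      rw [show lastEnd s (p :: ps) = lastEnd p.2 ps from rfl, ih]
      cases ps with
      | nil => simp
      | cons q qs =>
          cases h : (q :: qs).getLast? with
          | none => simp at h
          | some r => simp [List.getLast?_cons_cons, h]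

theorem append_if_false (g : List Bool) (c : Prop) [Decidable c] :
    g ++ (if c then [false] else []) = if c then g ++ [false] else g := by
  split <;> simp

-- B's foldl over zipped consecutive pairs equals gapsFrom with -1 as the initial previous end
theorem zip_foldl_eq_gapsFrom (ps : List (Int × Int)) :
    (ps.zip (ps.drop 1)).foldl
        (fun out pq => if pq.1.2 > 0 then out ++ [decide (pq.1.2 ≠ pq.2.1)] else out) []
      = gapsFrom (-1) ps := by
  have key : ∀ (ps : List (Int × Int)) (p : Int × Int) (acc : List Bool),
      ((p :: ps).zip ps).foldl
          (fun out pq => if pq.1.2 > 0 then out ++ [decide (pq.1.2 ≠ pq.2.1)] else out) acc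
        = acc ++ gapsFrom p.2 ps := by
    intro ps
    induction ps with
    | nil => intro p acc; simp [gapsFrom]
    | cons q qs ih =>
        intro p acc
        simp only [List.zip_cons_cons, List.foldl_cons, gapsFrom]
        rw [ih]
        split <;> simp
  cases ps with
  | nil => simp [gapsFrom]
  | cons p ps =>
      simp only [List.drop_one, List.tail_cons]
      rw [key]
      simp [gapsFrom]

-- ===== VERDICT (by name: the statement is the Claim_ definition above) =====
theorem check_spaces_spec : Claim_equal_check_spaces := by
  intro text tokens _
  unfold Spec_check_spaces check_spaces
  rw [csA_eq, lastEnd_getLast?]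
  simp only [check_spaces_alt, zip_foldl_eq_gapsFrom]
  cases h : (csB_positions text 0 tokens).getLast? with
  | none => simp
  | some p => split <;> simp [append_if_false]
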